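-- pv_equiv track=rewrite | github.com/2024-pass-backend/algorithm | Week2/공통/광물캐기/yubin.py | solution
-- ===== SOURCE A (Python) =====
-- def solution(picks, minerals):
--     answer = 0
--     stress_dic = {'diamond':[1, 5, 25], 'iron':[1, 1, 5], 'stone':[1, 1, 1]} # key: 광물, value: 곡괭이 피로도
--     stress = []
--     for i in range(0, len(minerals), 5):
--         temp = [0, 0, 0]
--         for m in minerals[i:i+5]:
--             temp[0] += stress_dic[m][0]
--             temp[1] += stress_dic[m][1]
--             temp[2] += stress_dic[m][2]
--         stress.append(temp)
--
--     if len(stress) > sum(picks):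
--         stress = stress[:sum(picks)]
--     stress = sorted(stress, key=lambda x:x[2], reverse= True)
--
--     s_idx = 0
--     Flag = False
--     for p_idx, p in enumerate(picks):
--         for _ in range(p):
--             answer += stress[s_idx][p_idx]
--             s_idx += 1
--             if s_idx >= len(stress):
--                 Flag = True
--                 break
--         if Flag:
--             break
--
--     return answer
-- ===== SOURCE B (Python) =====
-- def solution(picks, minerals):
--     # one streaming pass: a counter dict per block of 5 minerals
--     counts = {'diamond': 0, 'iron': 0, 'stone': 0}
--     chunks, n = [], 0
--     for m in minerals:
--         counts[m] += 1
--         n += 1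
--         if n == 5:
--             chunks.append((counts['diamond'], counts['iron'], counts['stone']))
--             counts = {'diamond': 0, 'iron': 0, 'stone': 0}
--             n = 0
--     if n:
--         chunks.append((counts['diamond'], counts['iron'], counts['stone']))
--     chunks = chunks[:sum(picks)]
--     # counting sort: bucket blocks by their stone-pickaxe fatigue 25d+5i+s (0..125); stable
--     buckets = {}
--     for g in chunks:
--         buckets.setdefault(25 * g[0] + 5 * g[1] + g[2], []).append(g)
--     # walk the blocks from the costliest bucket down, spending pickaxes in tier order
--     weights = [(1, 1, 1), (5, 1, 1), (25, 5, 1)]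
--     rest = list(enumerate(picks))
--     answer = 0
--     for k in reversed(range(126)):
--         for d, i, s in buckets.get(k, []):
--             while rest and rest[0][1] <= 0:
--                 rest.pop(0)
--             if not rest:
--                 return answer
--             t, c = rest[0]
--             wd, wi, ws = weights[t]
--             answer += wd * d + wi * i + ws * s
--             rest[0] = (t, c - 1)
--     return answer
-- ===== Notes on version B (the rewrite author's own statement) =====
-- stated objective: alternative
-- what changed: B streams the minerals once with running per-block counters instead of range/slice chunking, replaces the comparison sort by a stable counting sort into 126 fatigue buckets (keys 25d+5i+s are bounded), and spends pickaxes by walking the bucket order with a quota list instead of A's s_idx/Flag nested-break loop.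
import Mathlib
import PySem

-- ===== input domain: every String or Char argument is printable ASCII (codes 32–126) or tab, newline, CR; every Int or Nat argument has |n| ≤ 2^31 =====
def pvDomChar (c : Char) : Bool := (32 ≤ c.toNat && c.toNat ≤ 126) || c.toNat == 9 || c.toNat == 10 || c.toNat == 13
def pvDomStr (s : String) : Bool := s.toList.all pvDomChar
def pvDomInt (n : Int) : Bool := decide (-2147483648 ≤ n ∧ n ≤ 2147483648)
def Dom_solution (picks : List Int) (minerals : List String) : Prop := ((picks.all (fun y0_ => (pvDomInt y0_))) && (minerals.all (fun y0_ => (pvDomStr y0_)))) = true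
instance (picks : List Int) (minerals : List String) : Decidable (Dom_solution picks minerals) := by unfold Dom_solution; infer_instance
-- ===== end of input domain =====

-- B replaces A's range/slice chunking by one streaming pass with running counters, A's comparison
-- sort by a stable counting sort into 126 bounded fatigue buckets, and A's s_idx/Flag nested-break
-- assignment by a quota-list walk over the bucket order (objective: alternative).

-- ===== PORT A =====
def stressDicA : PySem.Dict String (List Int) :=
  PySem.Dict.ofList [("diamond", [1, 5, 25]), ("iron", [1, 1, 5]), ("stone", [1, 1, 1])]

-- temp[0] += …; temp[1] += …; temp[2] += … over one chunk of 5 (KeyError inputs are outside Pre_; getD default)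
def chunkA (chunk : List String) : List Int :=
  chunk.foldl (fun temp m =>
    let row := PySem.Dict.getD stressDicA m []
    [PySem.List.pyGetD temp 0 0 + PySem.List.pyGetD row 0 0,
     PySem.List.pyGetD temp 1 0 + PySem.List.pyGetD row 1 0,
     PySem.List.pyGetD temp 2 0 + PySem.List.pyGetD row 2 0]) [0, 0, 0]

-- inner 'for _ in range(p)' loop: answer += stress[s_idx][p_idx]; s_idx += 1; break with Flag
-- (stress[s_idx] raises in Python exactly on inputs outside Pre_; ported with default-indexing)
def innerA (T : List (List Int)) (pidx : Int) : Nat → Int × Nat → Int × Nat × Bool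
  | 0, (ans, s) => (ans, s, false)
  | Nat.succ n, (ans, s) =>
      let ans' := ans + PySem.List.pyGetD (PySem.List.pyGetD T (s : Int) []) pidx 0
      let s' := s + 1
      if T.length ≤ s' then (ans', s', true)
      else innerA T pidx n (ans', s')

-- outer 'for p_idx, p in enumerate(picks)' loop with the 'if Flag: break'
def outerA (T : List (List Int)) : List (Int × Int) → Int × Nat → Int
  | [], st => st.1
  | (pidx, p) :: rest, (ans, s) =>
      match innerA T pidx p.toNat (ans, s) with
      | (ans', s', flag) => if flag then ans' else outerA T rest (ans', s')

def solution (picks : List Int) (minerals : List String) : Int :=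
  let stress := (PySem.List.pyRange 0 (minerals.length : Int) 5).foldl
      (fun acc i => acc ++ [chunkA (PySem.List.slice minerals (some i) (some (i + 5)))]) []
  let stress := if (stress.length : Int) > picks.sum
      then PySem.List.slice stress none (some picks.sum) else stress
  let stress := PySem.List.sorted stress (fun x => PySem.List.pyGetD x (2 : Int) 0) true
  outerA stress (PySem.List.enumerate picks) (0, 0)

-- ===== PORT B =====
-- counts = {'diamond': 0, 'iron': 0, 'stone': 0}
def initC : PySem.Dict String Int :=
  PySem.Dict.ofList [("diamond", 0), ("iron", 0), ("stone", 0)]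

-- the appended tuple (counts['diamond'], counts['iron'], counts['stone'])
def flushC (c : PySem.Dict String Int) : Int × Int × Int :=
  (PySem.Dict.getD c "diamond" 0, PySem.Dict.getD c "iron" 0, PySem.Dict.getD c "stone" 0)

-- the streaming 'for m in minerals' loop with its 'if n == 5' flush and the trailing 'if n'
-- (counts[m] += 1 raises KeyError in Python exactly on inputs outside Pre_; ported with default 0)
def streamB : List String → List (Int × Int × Int) → PySem.Dict String Int → Int → List (Int × Int × Int)
  | [], chunks, c, n => if n ≠ 0 then chunks ++ [flushC c] else chunks
  | m :: ms, chunks, c, n =>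
      let c2 := c.modify m 0 (· + 1)
      let n2 := n + 1
      if n2 = 5 then streamB ms (chunks ++ [flushC c2]) initC 0
      else streamB ms chunks c2 n2

def keyB (g : Int × Int × Int) : Int := 25 * g.1 + 5 * g.2.1 + g.2.2

-- buckets.setdefault(25*g[0] + 5*g[1] + g[2], []).append(g)
def bucketsB (chunks : List (Int × Int × Int)) : PySem.Dict Int (List (Int × Int × Int)) :=
  chunks.foldl (fun d g => d.modify (keyB g) [] (fun l => l ++ [g])) (PySem.Dict.ofList [])

def weightsB : List (Int × Int × Int) := [(1, 1, 1), (5, 1, 1), (25, 5, 1)]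

-- one body of the inner 'for d, i, s in buckets.get(k, [])', with the early 'return answer'
-- (weights[t] raises in Python exactly on inputs outside Pre_; ported with default-indexing)
def stepB (st : Int × List (Int × Int)) (g : Int × Int × Int) : (Int × List (Int × Int)) ⊕ Int :=
  let rest := st.2.dropWhile (fun tc => tc.2 ≤ 0)
  match rest with
  | [] => Sum.inr st.1
  | (t, c) :: rs =>
      let w := PySem.List.pyGetD weightsB t (0, 0, 0)
      Sum.inl (st.1 + w.1 * g.1 + w.2.1 * g.2.1 + w.2.2 * g.2.2, (t, c - 1) :: rs)

def innerB : List (Int × Int × Int) → Int × List (Int × Int) → (Int × List (Int × Int)) ⊕ Int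
  | [], st => Sum.inl st
  | g :: gs, st =>
      match stepB st g with
      | Sum.inl st' => innerB gs st'
      | Sum.inr a => Sum.inr a

def outerB (bk : PySem.Dict Int (List (Int × Int × Int))) : List Int → Int × List (Int × Int) → Int
  | [], st => st.1
  | k :: ks, st =>
      match innerB (PySem.Dict.getD bk k []) st with
      | Sum.inl st' => outerB bk ks st'
      | Sum.inr a => a

def solution_alt (picks : List Int) (minerals : List String) : Int :=
  let chunks := streamB minerals [] initC 0
  let chunks := PySem.List.slice chunks none (some picks.sum)
  outerB (bucketsB chunks) (PySem.List.pyRange 0 126 1).reverse (0, PySem.List.enumerate picks)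

-- ===== PRECONDITION & SPEC =====
-- shape helpers for Pre_ (not used by either port)
def preTruncLen (picks : List Int) (minerals : List String) : Nat :=
  let n := (minerals.length + 4) / 5
  if 0 ≤ picks.sum then min n picks.sum.toNat else n - (-picks.sum).toNat

-- Pre_ excludes exactly the inputs where the Python A raises: a mineral outside the fatigue
-- table (KeyError), and the IndexError cases — a positive pick with an empty truncated group
-- list, or an assignment reaching a pickaxe index ≥ 3 within the truncated groups.
def preC3 (picks : List Int) : Int := ((picks.take 3).map (fun p => max p 0)).sum

def Pre_solution (picks : List Int) (minerals : List String) : Prop :=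
  (∀ m ∈ minerals, m = "diamond" ∨ m = "iron" ∨ m = "stone") ∧
  ((∀ p ∈ picks, p ≤ 0) ∨
    (0 < preTruncLen picks minerals ∧
      ((preTruncLen picks minerals : Int) ≤ preC3 picks ∨
        ∀ tc ∈ PySem.List.enumerate picks, 3 ≤ tc.1 → tc.2 ≤ 0)))
instance (picks : List Int) (minerals : List String) : Decidable (Pre_solution picks minerals) := by
  unfold Pre_solution; infer_instance

def pvWitness_solution : List Int × List String :=
  ([1, 1, 1], ["diamond", "diamond", "iron", "stone", "iron", "stone", "stone"])

def Spec_solution (picks : List Int) (minerals : List String) (out : Int) : Prop := out = solution_alt picks minerals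
instance (picks : List Int) (minerals : List String) (out : Int) : Decidable (Spec_solution picks minerals out) := by unfold Spec_solution; infer_instance

-- ===== CLAIM (what is proved, stated in full; the proofs are below) =====
def Claim_equal_solution : Prop := ∀ (picks : List Int) (minerals : List String), Dom_solution picks minerals → Pre_solution picks minerals → Spec_solution picks minerals (solution picks minerals)

-- ===== LEMMAS AND PROOFS =====

-- proof-side canonical forms
def costP (m : String) : Int × Int × Int :=
  if m = "diamond" then (1, 5, 25) else if m = "iron" then (1, 1, 5)
  else if m = "stone" then (1, 1, 1) else (0, 0, 0)

def cnt3 (chunk : List String) : Int × Int × Int :=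
  flushC (chunk.foldl (fun c m => c.modify m 0 (· + 1)) initC)

def toTriple (g : Int × Int × Int) : List Int :=
  [g.1 + g.2.1 + g.2.2, 5 * g.1 + g.2.1 + g.2.2, 25 * g.1 + 5 * g.2.1 + g.2.2]

def blocksP : List String → List (Int × Int × Int)
  | [] => []
  | [a] => [cnt3 [a]]
  | [a, b] => [cnt3 [a, b]]
  | [a, b, c] => [cnt3 [a, b, c]]
  | [a, b, c, d] => [cnt3 [a, b, c, d]]
  | a :: b :: c :: d :: e :: rest => cnt3 [a, b, c, d, e] :: blocksP rest

def validM (m : String) : Prop := m = "diamond" ∨ m = "iron" ∨ m = "stone"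

def fc (key : (Int × Int × Int) → Int) (ks : List Int) (p : List (Int × Int × Int)) : List (Int × Int × Int) :=
  ks.flatMap (fun k => p.filter (fun y => key y == k))

def fcL (key : List Int → Int) (ks : List Int) (p : List (List Int)) : List (List Int) :=
  ks.flatMap (fun k => p.filter (fun y => key y == k))

def runB (gs : List (Int × Int × Int)) (st : Int × List (Int × Int)) : Int :=
  match innerB gs st with
  | Sum.inl st' => st'.1
  | Sum.inr a => a

def zsum (gs : List (List Int)) (flat : List Int) : Int :=
  ((gs.zip flat).map (fun gt => PySem.List.pyGetD gt.1 gt.2 0)).sum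

def valW (t : Int) (g : Int × Int × Int) : Int :=
  let w := PySem.List.pyGetD weightsB t (0, 0, 0)
  w.1 * g.1 + w.2.1 * g.2.1 + w.2.2 * g.2.2

def wsum (gs : List (Int × Int × Int)) (flat : List Int) : Int :=
  ((gs.zip flat).map (fun gt => valW gt.2 gt.1)).sum

def flatP (rest : List (Int × Int)) : List Int :=
  rest.flatMap (fun tc => List.replicate tc.2.toNat tc.1)

def ksDesc : List Int := (PySem.List.pyRange 0 126 1).reverse

-- ---- per-chunk lemmas ----

lemma row_all (m : String) :
    PySem.List.pyGetD (PySem.Dict.getD stressDicA m []) 0 0 = (costP m).1 ∧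
    PySem.List.pyGetD (PySem.Dict.getD stressDicA m []) 1 0 = (costP m).2.1 ∧
    PySem.List.pyGetD (PySem.Dict.getD stressDicA m []) 2 0 = (costP m).2.2 := by
  by_cases h1 : m = "diamond"; · subst h1; decide
  by_cases h2 : m = "iron"; · subst h2; decide
  by_cases h3 : m = "stone"; · subst h3; decide
  have hmk : stressDicA = PySem.Dict.mk [("diamond", [1, 5, 25]), ("iron", [1, 1, 5]), ("stone", [1, 1, 1])] := by decide
  have hd : PySem.Dict.getD stressDicA m [] = [] := by
    rw [hmk]
    simp [PySem.Dict.getD, PySem.Dict.get?, Ne.symm h1, Ne.symm h2, Ne.symm h3]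
  simp [hd, costP, h1, h2, h3, PySem.List.pyGetD, PySem.List.pyGet?, PySem.List.pyIdx?]

lemma chunkA_fold (chunk : List String) : ∀ a b c : Int,
    chunk.foldl (fun temp m =>
      let row := PySem.Dict.getD stressDicA m []
      [PySem.List.pyGetD temp 0 0 + PySem.List.pyGetD row 0 0,
       PySem.List.pyGetD temp 1 0 + PySem.List.pyGetD row 1 0,
       PySem.List.pyGetD temp 2 0 + PySem.List.pyGetD row 2 0]) [a, b, c]
    = [a + (chunk.map (fun m => (costP m).1)).sum,
       b + (chunk.map (fun m => (costP m).2.1)).sum,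
       c + (chunk.map (fun m => (costP m).2.2)).sum] := by
  intro a b c
  induction chunk generalizing a b c with
  | nil => simp
  | cons m chunk ih =>
    obtain ⟨r1, r2, r3⟩ := row_all m
    simp only [List.foldl_cons, List.map_cons, List.sum_cons]
    have ht : ∀ a b c : Int, (PySem.List.pyGetD [a, b, c] 0 0 = a) ∧
        (PySem.List.pyGetD [a, b, c] 1 0 = b) ∧ (PySem.List.pyGetD [a, b, c] 2 0 = c) := by
      intro a b c
      refine ⟨?_, ?_, ?_⟩ <;> simp [pysem]
    rw [(ht a b c).1, (ht a b c).2.1, (ht a b c).2.2, r1, r2, r3, ih]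
    simp [add_assoc]

lemma cnt3_eq (chunk : List String) :
    cnt3 chunk = (((chunk.count "diamond" : ℕ) : Int), ((chunk.count "iron" : ℕ) : Int),
      ((chunk.count "stone" : ℕ) : Int)) := by
  unfold cnt3 flushC
  rw [PySem.Dict.getD_foldl_modify_add_one, PySem.Dict.getD_foldl_modify_add_one,
      PySem.Dict.getD_foldl_modify_add_one]
  have h1 : PySem.Dict.getD initC "diamond" 0 = 0 := by decide
  have h2 : PySem.Dict.getD initC "iron" 0 = 0 := by decide
  have h3 : PySem.Dict.getD initC "stone" 0 = 0 := by decide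
  rw [h1, h2, h3]
  simp

lemma count3_le_length (chunk : List String) :
    chunk.count "diamond" + chunk.count "iron" + chunk.count "stone" ≤ chunk.length := by
  induction chunk with
  | nil => simp
  | cons m c ih =>
    simp only [List.count_cons, List.length_cons]
    split_ifs <;> simp_all <;> omega

lemma costP_d : costP "diamond" = (1, 5, 25) := by decide
lemma costP_i : costP "iron" = (1, 1, 5) := by decide
lemma costP_s : costP "stone" = (1, 1, 1) := by decide

lemma chunk_sums (chunk : List String) (h : ∀ m ∈ chunk, validM m) :
    (chunk.map (fun m => (costP m).1)).sum = (cnt3 chunk).1 + (cnt3 chunk).2.1 + (cnt3 chunk).2.2 ∧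
    (chunk.map (fun m => (costP m).2.1)).sum = 5 * (cnt3 chunk).1 + (cnt3 chunk).2.1 + (cnt3 chunk).2.2 ∧
    (chunk.map (fun m => (costP m).2.2)).sum = 25 * (cnt3 chunk).1 + 5 * (cnt3 chunk).2.1 + (cnt3 chunk).2.2 := by
  simp only [cnt3_eq]
  induction chunk with
  | nil => simp
  | cons m c ih =>
    have hv := h m (by simp)
    obtain ⟨s1, s2, s3⟩ := ih (fun x hx => h x (by simp [hx]))
    rcases hv with rfl | rfl | rfl <;>
      simp only [List.map_cons, List.sum_cons, List.count_cons, s1, s2, s3] <;>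
      simp only [costP_d, costP_i, costP_s] <;>
      refine ⟨by norm_num; ring, by norm_num; ring, by norm_num; ring⟩

lemma chunkA_eq_toTriple (chunk : List String) (h : ∀ m ∈ chunk, validM m) :
    chunkA chunk = toTriple (cnt3 chunk) := by
  rw [chunkA, chunkA_fold]
  obtain ⟨s1, s2, s3⟩ := chunk_sums chunk h
  rw [s1, s2, s3, toTriple]
  simp

lemma cnt3_bounds (chunk : List String) :
    0 ≤ (cnt3 chunk).1 ∧ 0 ≤ (cnt3 chunk).2.1 ∧ 0 ≤ (cnt3 chunk).2.2 ∧
      (cnt3 chunk).1 + (cnt3 chunk).2.1 + (cnt3 chunk).2.2 ≤ (chunk.length : Int) := by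
  have h3 := count3_le_length chunk
  rw [cnt3_eq]
  refine ⟨by simp, by simp, by simp, by push_cast; omega⟩

-- ---- chunking: A's range/slice map and B's stream both equal blocksP ----

lemma pyRange5_succ (n : ℕ) :
    PySem.List.pyRange 0 ((n : Int) + 5) 5 = 0 :: (PySem.List.pyRange 0 (n : Int) 5).map (· + 5) := by
  rw [PySem.List.pyRange_of_pos 0 ((n : Int) + 5) (by norm_num), PySem.List.pyRange_of_pos 0 (n : Int) (by norm_num)]
  rcases Nat.eq_zero_or_pos n with rfl | hn
  · norm_num
  · have h2 : (0 : Int) < (n : Int) := by exact_mod_cast hn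
    have h1 : (0 : Int) < (n : Int) + 5 := by omega
    rw [if_pos h1, if_pos h2]
    have h3 : (((n : Int) + 5 - 0 + 5 - 1) / 5).toNat = (((n : Int) - 0 + 5 - 1) / 5).toNat + 1 := by
      omega
    rw [h3, List.range_succ_eq_map, List.map_cons, List.map_map, List.map_map]
    refine congrArg (0 :: ·) (List.map_congr_left ?_)
    intro k _
    simp [Function.comp, Nat.succ_eq_add_one]
    ring

lemma slice_shift5 {α : Type} (c5 rest : List α) (h5 : c5.length = 5) (i : Int) (hi : 0 ≤ i) :
    PySem.List.slice (c5 ++ rest) (some (i + 5)) (some (i + 5 + 5)) = PySem.List.slice rest (some i) (some (i + 5)) := by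
  obtain ⟨a, rfl⟩ := Int.eq_ofNat_of_zero_le hi
  rw [show ((a : Int) + 5 : Int) = ((a + 5 : ℕ) : Int) by push_cast; ring,
      show (((a + 5 : ℕ) : Int) + 5 : Int) = ((a + 10 : ℕ) : Int) by push_cast; ring,
      PySem.List.slice_natCast, PySem.List.slice_natCast]
  rw [List.drop_append]
  rw [List.drop_eq_nil_of_le (by omega : c5.length ≤ a + 5), List.nil_append, h5]
  congr 1
  omega

lemma slice_0_5 {α : Type} (xs : List α) (hlen : xs.length ≤ 5) :
    PySem.List.slice xs none (some 5) = xs := by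
  rw [PySem.List.slice_to xs (by norm_num : (0 : Int) ≤ 5)]
  exact List.take_of_length_le hlen

lemma A_chunks_short (ms : List String) (h : ∀ m ∈ ms, validM m)
    (h1 : 0 < ms.length) (h4 : ms.length ≤ 4) :
    (PySem.List.pyRange 0 (ms.length : Int) 5).map
        (fun i => chunkA (PySem.List.slice ms (some i) (some (i + 5))))
      = [toTriple (cnt3 ms)] := by
  have hpos : (0 : Int) < (ms.length : Int) := by exact_mod_cast h1
  have h4' : (ms.length : Int) ≤ 4 := by exact_mod_cast h4
  rw [PySem.List.pyRange_of_pos 0 _ (by norm_num), if_pos hpos]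
  have hc : (((ms.length : Int) - 0 + 5 - 1) / 5).toNat = 1 := by omega
  rw [hc, List.range_one]
  norm_num
  rw [slice_0_5 ms (by omega), chunkA_eq_toTriple ms h]

lemma A_chunks (minerals : List String) (h : ∀ m ∈ minerals, validM m) :
    (PySem.List.pyRange 0 (minerals.length : Int) 5).map
        (fun i => chunkA (PySem.List.slice minerals (some i) (some (i + 5))))
      = (blocksP minerals).map toTriple := by
  induction minerals using blocksP.induct with
  | case1 =>
    rw [PySem.List.pyRange_of_pos 0 _ (by norm_num)]
    norm_num [blocksP]
  | case2 a => rw [A_chunks_short [a] h (by norm_num) (by norm_num)]; simp [blocksP]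
  | case3 a b => rw [A_chunks_short [a, b] h (by norm_num) (by norm_num)]; simp [blocksP]
  | case4 a b c => rw [A_chunks_short [a, b, c] h (by norm_num) (by norm_num)]; simp [blocksP]
  | case5 a b c d => rw [A_chunks_short [a, b, c, d] h (by norm_num) (by norm_num)]; simp [blocksP]
  | case6 a b c d e rest ih =>
    have hval5 : ∀ m ∈ [a, b, c, d, e], validM m := by
      intro m hm
      apply h
      simp at hm ⊢
      tauto
    have hvalr : ∀ m ∈ rest, validM m := fun m hm => h m (by simp [hm])
    have hlen : ((a :: b :: c :: d :: e :: rest).length : Int) = (rest.length : Int) + 5 := by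
      simp
      ring
    rw [hlen, pyRange5_succ]
    simp only [List.map_cons, List.map_map, blocksP]
    congr 1
    · have hs : PySem.List.slice (a :: b :: c :: d :: e :: rest) (some 0) (some (0 + 5)) = [a, b, c, d, e] := by
        rw [show ((0 : Int) + 5 : Int) = (5 : Int) by norm_num,
            show (0 : Int) = ((0 : ℕ) : Int) by norm_num, show (5 : Int) = ((5 : ℕ) : Int) by norm_num,
            PySem.List.slice_natCast]
        rfl
      rw [hs, chunkA_eq_toTriple _ hval5]
    · have hcong : List.map ((fun i => chunkA (PySem.List.slice (a :: b :: c :: d :: e :: rest) (some i) (some (i + 5)))) ∘ (· + 5))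
          (PySem.List.pyRange 0 ((rest.length : ℕ) : Int) 5)
          = List.map (fun i => chunkA (PySem.List.slice rest (some i) (some (i + 5))))
          (PySem.List.pyRange 0 ((rest.length : ℕ) : Int) 5) := by
        refine List.map_congr_left ?_
        intro i hi
        have hi0 : 0 ≤ i := ((PySem.List.mem_pyRange_iff_of_pos (by norm_num) i).mp hi).1
        simp only [Function.comp]
        rw [show (a :: b :: c :: d :: e :: rest) = [a, b, c, d, e] ++ rest from rfl,
            slice_shift5 [a, b, c, d, e] rest rfl i hi0]
      rw [hcong, ih hvalr]

lemma streamB_acc (ms : List String) : ∀ (c1 c2 : List (Int × Int × Int)) (cnt : PySem.Dict String Int) (n : Int),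
    streamB ms (c1 ++ c2) cnt n = c1 ++ streamB ms c2 cnt n := by
  induction ms with
  | nil =>
    intro c1 c2 cnt n
    simp only [streamB]
    split_ifs <;> simp
  | cons m ms ih =>
    intro c1 c2 cnt n
    simp only [streamB]
    split_ifs with h
    · rw [List.append_assoc]
      exact ih c1 (c2 ++ [flushC (cnt.modify m 0 (· + 1))]) initC 0
    · exact ih c1 c2 (cnt.modify m 0 (· + 1)) (n + 1)

lemma streamB_acc_nil (ms : List String) (c : List (Int × Int × Int)) (cnt : PySem.Dict String Int) (n : Int) :
    streamB ms c cnt n = c ++ streamB ms [] cnt n := by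
  simpa using streamB_acc ms c [] cnt n

lemma streamB_blocks (ms : List String) : streamB ms [] initC 0 = blocksP ms := by
  induction ms using blocksP.induct with
  | case1 => norm_num [streamB, blocksP]
  | case2 a => norm_num [streamB, blocksP, cnt3, flushC]
  | case3 a b => norm_num [streamB, blocksP, cnt3, flushC]
  | case4 a b c => norm_num [streamB, blocksP, cnt3, flushC]
  | case5 a b c d => norm_num [streamB, blocksP, cnt3, flushC]
  | case6 a b c d e rest ih =>
    norm_num [streamB]
    rw [streamB_acc_nil, ih]
    norm_num [blocksP, cnt3, flushC]

lemma blocksP_mem_bounds (ms : List String) : ∀ g ∈ blocksP ms,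
    0 ≤ g.1 ∧ 0 ≤ g.2.1 ∧ 0 ≤ g.2.2 ∧ g.1 + g.2.1 + g.2.2 ≤ 5 := by
  induction ms using blocksP.induct with
  | case1 => simp [blocksP]
  | case2 a =>
    intro g hg
    simp [blocksP] at hg
    obtain ⟨b1, b2, b3, b4⟩ := cnt3_bounds [a]
    simp at b4
    subst hg
    omega
  | case3 a b =>
    intro g hg
    simp [blocksP] at hg
    obtain ⟨b1, b2, b3, b4⟩ := cnt3_bounds [a, b]
    simp at b4
    subst hg
    omega
  | case4 a b c =>
    intro g hg
    simp [blocksP] at hg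
    obtain ⟨b1, b2, b3, b4⟩ := cnt3_bounds [a, b, c]
    simp at b4
    subst hg
    omega
  | case5 a b c d =>
    intro g hg
    simp [blocksP] at hg
    obtain ⟨b1, b2, b3, b4⟩ := cnt3_bounds [a, b, c, d]
    simp at b4
    subst hg
    omega
  | case6 a b c d e rest ih =>
    intro g hg
    simp only [blocksP, List.mem_cons] at hg
    rcases hg with rfl | hg
    · obtain ⟨b1, b2, b3, b4⟩ := cnt3_bounds [a, b, c, d, e]
      simp at b4
      omega
    · exact ih g hg

lemma slice_none_map (f : (Int × Int × Int) → List Int) (l : List (Int × Int × Int)) (j : Int) :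
    PySem.List.slice (l.map f) none (some j) = (PySem.List.slice l none (some j)).map f := by
  simp [PySem.List.slice, List.map_take]

lemma mem_slice_none {α : Type} (l : List α) (j : Int) (x : α)
    (hx : x ∈ PySem.List.slice l none (some j)) : x ∈ l := by
  simp only [PySem.List.slice] at hx
  exact List.mem_of_mem_drop (List.mem_of_mem_take hx)

-- ---- buckets ----

lemma bucketsB_getD (chunks : List (Int × Int × Int)) (k : Int) :
    PySem.Dict.getD (bucketsB chunks) k [] = chunks.filter (fun g => keyB g == k) := by
  unfold bucketsB
  have hfold : chunks.foldl (fun d g => d.modify (keyB g) [] (fun l => l ++ [g])) (PySem.Dict.ofList [])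
      = (chunks.map (fun g => (keyB g, g))).foldl (fun d p => d.modify p.1 [] (fun l => l ++ [p.2])) (PySem.Dict.ofList []) := by
    rw [List.foldl_map]
  rw [hfold, PySem.Dict.getD_foldl_modify_append]
  have h0 : PySem.Dict.getD (PySem.Dict.ofList ([] : List (Int × List (Int × Int × Int)))) k [] = [] := by
    rfl
  rw [h0, List.nil_append, List.filter_map, List.map_map]
  exact List.map_id' _

-- ---- stable sort as filter concatenation ----

lemma insertBy_prefix {α : Type} (before : α → α → Bool) (x : α) (l r : List α)
    (h : ∀ y ∈ l, before x y = false) :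
    PySem.List.insertBy before x (l ++ r) = l ++ PySem.List.insertBy before x r := by
  induction l with
  | nil => simp
  | cons y l ih =>
    have hy := h y (by simp)
    rw [List.cons_append]
    simp only [PySem.List.insertBy, hy]
    simp only [Bool.false_eq_true, if_false]
    rw [ih (fun z hz => h z (by simp [hz])), List.cons_append]

lemma insertBy_front {α : Type} (before : α → α → Bool) (x : α) (r : List α)
    (h : ∀ y ∈ r, before x y = true) :
    PySem.List.insertBy before x r = x :: r := by
  cases r with
  | nil => rfl
  | cons y ys =>
    have hy := h y (by simp)
    simp [PySem.List.insertBy, hy]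

lemma flatMap_congr_mem {α β : Type} (l : List α) (f g : α → List β) (h : ∀ a ∈ l, f a = g a) :
    l.flatMap f = l.flatMap g := by
  induction l with
  | nil => rfl
  | cons a l ih =>
    simp only [List.flatMap_cons]
    rw [h a (by simp), ih (fun x hx => h x (by simp [hx]))]

lemma fcL_insert (key : List Int → Int) (ks : List Int) (hks : ks.Pairwise (· > ·))
    (x : List Int) (hx : key x ∈ ks) (p : List (List Int)) :
    PySem.List.insertBy (fun a b => decide (key b < key a)) x (fcL key ks p) = fcL key ks (p ++ [x]) := by
  induction ks generalizing p with
  | nil => simp at hx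
  | cons k ks ih =>
    obtain ⟨hk1, hk2⟩ := List.pairwise_cons.mp hks
    simp only [fcL, List.flatMap_cons]
    by_cases hxk : key x = k
    · have hnb : ∀ y ∈ p.filter (fun y => key y == k), (fun a b => decide (key b < key a)) x y = false := by
        intro y hy
        have hyk : key y = k := by simpa using (List.mem_filter.mp hy).2
        simp [hyk, hxk]
      rw [insertBy_prefix _ _ _ _ hnb]
      have hfront : ∀ y ∈ ks.flatMap (fun k' => p.filter (fun y => key y == k')),
          (fun a b => decide (key b < key a)) x y = true := by
        intro y hy
        obtain ⟨k', hk', hy'⟩ := List.mem_flatMap.mp hy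
        have hky : key y = k' := by simpa using (List.mem_filter.mp hy').2
        have hlt : k > k' := hk1 k' hk'
        simp [hky, hxk]
        omega
      rw [insertBy_front _ _ _ hfront]
      have h1 : (p ++ [x]).filter (fun y => key y == k) = p.filter (fun y => key y == k) ++ [x] := by
        rw [List.filter_append]
        simp [hxk]
      have h2 : ks.flatMap (fun k' => (p ++ [x]).filter (fun y => key y == k'))
          = ks.flatMap (fun k' => p.filter (fun y => key y == k')) := by
        refine flatMap_congr_mem _ _ _ (fun k' hk' => ?_)
        rw [List.filter_append]
        have hlt : k > k' := hk1 k' hk'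
        have hne : ¬ (key x == k') = true := by
          simp [hxk]
          omega
        simp [hne]
      rw [h1, h2, List.append_assoc, List.singleton_append]
    · have hx' : key x ∈ ks := by
        rcases List.mem_cons.mp hx with h | h
        · exact absurd h hxk
        · exact h
      have hnb : ∀ y ∈ p.filter (fun y => key y == k), (fun a b => decide (key b < key a)) x y = false := by
        intro y hy
        have hyk : key y = k := by simpa using (List.mem_filter.mp hy).2
        have hlt : k > key x := hk1 (key x) hx'
        simp [hyk]
        omega
      rw [insertBy_prefix _ _ _ _ hnb]
      have hih := ih hk2 hx' p
      simp only [fcL] at hih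
      rw [hih]
      have h2 : (p ++ [x]).filter (fun y => key y == k) = p.filter (fun y => key y == k) := by
        rw [List.filter_append]
        simp [hxk]
      rw [h2]

lemma fcL_foldl (key : List Int → Int) (ks : List Int) (hks : ks.Pairwise (· > ·)) :
    ∀ (xs p : List (List Int)), (∀ x ∈ xs, key x ∈ ks) →
    xs.foldl (fun acc x => PySem.List.insertBy (fun a b => decide (key b < key a)) x acc) (fcL key ks p)
      = fcL key ks (p ++ xs) := by
  intro xs
  induction xs with
  | nil => intro p h; simp
  | cons x xs ih =>
    intro p h
    rw [List.foldl_cons, fcL_insert key ks hks x (h x (by simp)) p]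
    have := ih (p ++ [x]) (fun z hz => h z (by simp [hz]))
    rw [this, List.append_assoc, List.singleton_append]

lemma sorted_rev_fcL (xs : List (List Int)) (key : List Int → Int) (ks : List Int)
    (hks : ks.Pairwise (· > ·)) (hmem : ∀ x ∈ xs, key x ∈ ks) :
    PySem.List.sorted xs key true = fcL key ks xs := by
  rw [PySem.List.sorted_rev_eq_foldl_insertBy]
  have h0 : fcL key ks [] = [] := by simp [fcL]
  have := fcL_foldl key ks hks xs [] hmem
  rw [h0] at this
  simpa using this

lemma ksDesc_pairwise : ksDesc.Pairwise (· > ·) := by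
  unfold ksDesc
  rw [show (126 : Int) = ((126 : ℕ) : Int) by norm_num, PySem.List.pyRange_zero_natCast,
      List.pairwise_reverse, List.pairwise_map]
  refine List.Pairwise.imp ?_ (List.pairwise_lt_range)
  intro a b hab
  exact_mod_cast hab

lemma mem_ksDesc (k : Int) (h0 : 0 ≤ k) (h1 : k < 126) : k ∈ ksDesc := by
  unfold ksDesc
  rw [show (126 : Int) = ((126 : ℕ) : Int) by norm_num, PySem.List.pyRange_zero_natCast,
      List.mem_reverse, List.mem_map]
  exact ⟨k.toNat, by rw [List.mem_range]; omega, by omega⟩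

-- ---- the walk over the buckets ----

lemma innerB_append (l1 l2 : List (Int × Int × Int)) (st : Int × List (Int × Int)) :
    innerB (l1 ++ l2) st =
      (match innerB l1 st with
       | Sum.inl st' => innerB l2 st'
       | Sum.inr a => Sum.inr a) := by
  induction l1 generalizing st with
  | nil => simp [innerB]
  | cons g l1 ih =>
    rw [List.cons_append]
    simp only [innerB]
    cases stepB st g with
    | inl st' => simpa using ih st'
    | inr a => simp

lemma outerB_fc (bk : PySem.Dict Int (List (Int × Int × Int))) (ks : List Int) :
    ∀ st, outerB bk ks st = runB (ks.flatMap (fun k => PySem.Dict.getD bk k [])) st := by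
  induction ks with
  | nil => intro st; simp [outerB, runB, innerB]
  | cons k ks ih =>
    intro st
    simp only [outerB, List.flatMap_cons, runB, innerB_append]
    cases h : innerB (PySem.Dict.getD bk k []) st with
    | inl st' =>
      have := ih st'
      simp only [runB] at this
      simp [this]
    | inr a => simp

lemma flatP_dropWhile (rest : List (Int × Int)) :
    flatP (rest.dropWhile (fun tc => tc.2 ≤ 0)) = flatP rest := by
  induction rest with
  | nil => rfl
  | cons tc rest ih =>
    by_cases h : tc.2 ≤ 0
    · rw [List.dropWhile_cons_of_pos (by simpa using h), ih]
      unfold flatP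
      rw [List.flatMap_cons]
      have h0 : tc.2.toNat = 0 := by omega
      simp [h0]
    · rw [List.dropWhile_cons_of_neg (by simpa using h)]

lemma dropWhile_head_false {α : Type} (p : α → Bool) (l : List α) (y : α) (ys : List α)
    (h : l.dropWhile p = y :: ys) : p y = false := by
  have hne : l.dropWhile p ≠ [] := by simp [h]
  have h1 := List.head_dropWhile_not p hne
  have h2 : (l.dropWhile p).head hne = y := by simp [h]
  rwa [h2] at h1

lemma runB_wsum (gs : List (Int × Int × Int)) : ∀ (ans : Int) (rest : List (Int × Int)),
    runB gs (ans, rest) = ans + wsum gs (flatP rest) := by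
  induction gs with
  | nil => intro ans rest; simp [runB, innerB, wsum]
  | cons g gs ih =>
    intro ans rest
    rcases hdw : rest.dropWhile (fun tc => tc.2 ≤ 0) with _ | ⟨⟨t, c⟩, rs⟩
    · have hstep : stepB (ans, rest) g = Sum.inr ans := by
        simp [stepB, hdw]
      have hf : flatP rest = [] := by
        rw [← flatP_dropWhile, hdw]
        rfl
      simp [runB, innerB, hstep, hf, wsum]
    · have hc : ¬ (c ≤ 0) := by
        have := dropWhile_head_false _ _ _ _ hdw
        simpa using this
      have hstep : stepB (ans, rest) g = Sum.inl (ans + valW t g, (t, c - 1) :: rs) := by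
        simp [stepB, hdw, valW]
        ring
      have hinner : runB (g :: gs) (ans, rest) = runB gs (ans + valW t g, (t, c - 1) :: rs) := by
        simp [runB, innerB, hstep]
      rw [hinner, ih]
      have hflat : flatP rest = t :: flatP ((t, c - 1) :: rs) := by
        rw [← flatP_dropWhile rest, hdw]
        unfold flatP
        rw [List.flatMap_cons, List.flatMap_cons]
        have h1 : c.toNat = (c - 1).toNat + 1 := by omega
        rw [h1, List.replicate_succ]
        simp
      rw [hflat]
      simp [wsum]
      ring

-- ---- A's assignment loop as zsum ----

lemma zsum_nil_right (gs : List (List Int)) : zsum gs [] = 0 := by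
  simp [zsum]

lemma zsum_nil_left (f : List Int) : zsum [] f = 0 := by
  simp [zsum]

lemma zsum_cons (g : List Int) (a : Int) (gs : List (List Int)) (f : List Int) :
    zsum (g :: gs) (a :: f) = PySem.List.pyGetD g a 0 + zsum gs f := by
  simp [zsum]

lemma zsum_append (x y : List Int) (l : List (List Int)) :
    zsum l (x ++ y) = zsum l x + zsum (l.drop x.length) y := by
  induction x generalizing l with
  | nil => simp [zsum]
  | cons a x ih =>
    cases l with
    | nil => simp [zsum]
    | cons g l =>
      rw [List.cons_append, zsum_cons, zsum_cons, ih, List.length_cons,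
        List.drop_succ_cons, add_assoc]

lemma innerA_eq (T : List (List Int)) (pidx : Int) :
    ∀ (n : Nat) (ans : Int) (s : Nat), s < T.length →
    innerA T pidx n (ans, s) =
      (ans + zsum (T.drop s) (List.replicate n pidx), min (s + n) T.length,
       decide (T.length ≤ s + n)) := by
  intro n
  induction n with
  | zero =>
    intro ans s h
    simp [innerA, zsum_nil_right, Nat.min_eq_left h.le, Nat.not_le.mpr h]
  | succ n ih =>
    intro ans s h
    have hg : PySem.List.pyGetD T (s : Int) [] = T[s] := by
      rw [PySem.List.pyGetD_natCast]
      exact List.getD_eq_getElem T [] h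
    have hdrop : T.drop s = T[s] :: T.drop (s + 1) := List.drop_eq_getElem_cons h
    simp only [innerA, hg]
    by_cases hend : T.length ≤ s + 1
    · have hd2 : T.drop (s + 1) = [] := List.drop_eq_nil_of_le (by omega)
      simp only [if_pos hend, hdrop, List.replicate_succ, zsum_cons, hd2, zsum_nil_left]
      simp only [Prod.mk.injEq]
      refine ⟨by ring, by omega, (decide_eq_true_iff.mpr (by omega)).symm⟩
    · rw [if_neg hend, ih _ _ (by omega)]
      simp only [hdrop, List.replicate_succ, zsum_cons, Prod.mk.injEq]
      refine ⟨by ring, by omega, ?_⟩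
      rw [decide_eq_decide]
      omega

lemma outerA_eq (T : List (List Int)) :
    ∀ (pk : List (Int × Int)) (ans : Int) (s : Nat), s ≤ T.length →
    outerA T pk (ans, s) =
      ans + zsum (T.drop s) (pk.flatMap (fun tc => List.replicate tc.2.toNat tc.1)) := by
  intro pk
  induction pk with
  | nil => intro ans s _; simp [outerA, zsum_nil_right]
  | cons hd rest ih =>
    intro ans s hs
    obtain ⟨pidx, p⟩ := hd
    by_cases hp : p.toNat = 0
    · simp only [outerA, hp, innerA, Bool.false_eq_true, if_false, List.flatMap_cons,
        List.replicate_zero, List.nil_append]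
      exact ih ans s hs
    · by_cases hs' : s < T.length
      · simp only [outerA, innerA_eq T pidx p.toNat ans s hs']
        by_cases hfl : T.length ≤ s + p.toNat
        · have hnil : (T.drop s).drop p.toNat = [] :=
            List.drop_eq_nil_of_le (by simp [List.length_drop]; omega)
          simp only [decide_eq_true_iff.mpr hfl, if_true, List.flatMap_cons, zsum_append,
            List.length_replicate, hnil, zsum_nil_left, add_zero]
        · have hd : decide (T.length ≤ s + p.toNat) = false := by
            simp [hfl]
          have hmin : min (s + p.toNat) T.length = s + p.toNat := by omega
          simp only [hd, Bool.false_eq_true, if_false, hmin]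
          rw [ih _ _ (by omega), List.flatMap_cons, zsum_append, List.length_replicate,
            List.drop_drop, add_assoc]
      · have hsl : s = T.length := by omega
        obtain ⟨n, hn⟩ : ∃ n, p.toNat = n + 1 := ⟨p.toNat - 1, by omega⟩
        have h0 : PySem.List.pyGetD T (s : Int) [] = [] := by
          rw [PySem.List.pyGetD_natCast]
          exact List.getD_eq_default T [] (by omega)
        have hdnil : T.drop s = [] := List.drop_eq_nil_of_le (by omega)
        simp only [outerA, hn, innerA, h0, if_pos (show T.length ≤ s + 1 by omega)]
        simp [hdnil, zsum_nil_left, PySem.List.pyGetD, PySem.List.pyGet?, PySem.List.pyIdx?]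

-- ---- bridging zsum over mapped triples with wsum ----

lemma val_eq (g : Int × Int × Int) (t : Int) (ht : 0 ≤ t) :
    PySem.List.pyGetD (toTriple g) t 0 = valW t g := by
  obtain ⟨n, rfl⟩ := Int.eq_ofNat_of_zero_le ht
  unfold valW
  rw [PySem.List.pyGetD_natCast, PySem.List.pyGetD_natCast]
  rcases n with _ | _ | _ | n <;> simp [toTriple, weightsB, List.getD]

lemma zsum_map_toTriple (gs : List (Int × Int × Int)) (ts : List Int) (hts : ∀ t ∈ ts, 0 ≤ t) :
    zsum (gs.map toTriple) ts = wsum gs ts := by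
  induction gs generalizing ts with
  | nil => simp [zsum, wsum]
  | cons g gs ih =>
    cases ts with
    | nil => simp [zsum, wsum]
    | cons t ts =>
      have h0 := hts t (by simp)
      simp only [List.map_cons, zsum_cons]
      rw [val_eq g t h0, ih ts (fun u hu => hts u (by simp [hu]))]
      simp [wsum]

lemma enumerate_fst_nonneg (l : List Int) : ∀ s : Int, ∀ x ∈ PySem.List.enumerate l s, s ≤ x.1 := by
  induction l with
  | nil => intro s x hx; simp [PySem.List.enumerate] at hx
  | cons a l ih =>
    intro s x hx
    simp only [PySem.List.enumerate] at hx
    rcases List.mem_cons.mp hx with rfl | hx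
    · simp
    · have := ih (s + 1) x hx
      omega

lemma flatP_enum_nonneg (picks : List Int) : ∀ t ∈ flatP (PySem.List.enumerate picks), 0 ≤ t := by
  intro t ht
  unfold flatP at ht
  obtain ⟨tc, htc, hmem⟩ := List.mem_flatMap.mp ht
  have h1 := enumerate_fst_nonneg picks 0 tc htc
  have h2 : t = tc.1 := List.eq_of_mem_replicate hmem
  omega

-- ---- main equality ----

lemma keyA_toTriple (g : Int × Int × Int) : PySem.List.pyGetD (toTriple g) (2 : Int) 0 = keyB g := by
  simp [pysem, toTriple, keyB]

lemma ports_eq (picks : List Int) (minerals : List String)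
    (hval : ∀ m ∈ minerals, validM m) :
    solution picks minerals = solution_alt picks minerals := by
  unfold solution solution_alt
  dsimp only
  rw [PySem.List.foldl_append_singleton_eq_map, List.nil_append, A_chunks minerals hval]
  set gs := (blocksP minerals).map toTriple with hgs
  have htr : (if ((gs.length : Int) > picks.sum)
      then PySem.List.slice gs none (some picks.sum) else gs)
      = PySem.List.slice gs none (some picks.sum) := by
    split_ifs with hcond
    · rfl
    · rw [PySem.List.slice_to gs (by omega)]
      exact (List.take_of_length_le (by omega)).symm
  rw [htr, hgs, slice_none_map]
  set tr := PySem.List.slice (blocksP minerals) none (some picks.sum) with htrdef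
  have hmem : ∀ x ∈ tr.map toTriple, (fun x => PySem.List.pyGetD x (2 : Int) 0) x ∈ ksDesc := by
    intro x hx
    obtain ⟨g, hg, rfl⟩ := List.mem_map.mp hx
    obtain ⟨b1, b2, b3, b4⟩ := blocksP_mem_bounds minerals g (mem_slice_none _ _ _ (htrdef ▸ hg))
    simp only [keyA_toTriple]
    exact mem_ksDesc _ (by unfold keyB; omega) (by unfold keyB; omega)
  rw [sorted_rev_fcL (tr.map toTriple) _ ksDesc ksDesc_pairwise hmem]
  have hfc : fcL (fun x => PySem.List.pyGetD x (2 : Int) 0) ksDesc (tr.map toTriple)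
      = (fc keyB ksDesc tr).map toTriple := by
    unfold fcL fc
    rw [List.map_flatMap]
    refine flatMap_congr_mem _ _ _ (fun k _ => ?_)
    rw [List.filter_map]
    refine congrArg (List.map toTriple) (List.filter_congr fun g _ => ?_)
    simp [Function.comp, keyA_toTriple]
  rw [hfc, outerA_eq _ (PySem.List.enumerate picks) 0 0 (Nat.zero_le _), List.drop_zero, zero_add]
  rw [show (PySem.List.enumerate picks).flatMap (fun tc => List.replicate tc.2.toNat tc.1)
      = flatP (PySem.List.enumerate picks) from rfl]
  rw [zsum_map_toTriple _ _ (flatP_enum_nonneg picks)]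
  rw [streamB_blocks, outerB_fc]
  have hbk : ((PySem.List.pyRange 0 126 1).reverse).flatMap
      (fun k => PySem.Dict.getD (bucketsB tr) k []) = fc keyB ksDesc tr := by
    refine flatMap_congr_mem _ _ _ (fun k _ => bucketsB_getD tr k)
  rw [hbk, runB_wsum, zero_add]

-- ===== VERDICT (by name: the statement is the Claim_ definition above) =====
theorem solution_spec : Claim_equal_solution := by
  intro picks minerals _ hpre
  unfold Spec_solution
  exact ports_eq picks minerals hpre.1
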